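-- pv_equiv track=rewrite | github.com/Pravin-surawase/structural_engineering_lib | streamlit_app/utils/lod_manager.py | _extract_corner_bars
-- ===== SOURCE A (Python) =====
-- def _extract_corner_bars(bars: list[dict]) -> list[dict]:
--     """Extract corner bars (first and last) from bar list.
--
--     For simplified LOD, we only show corner bars to indicate
--     reinforcement pattern without full detail.
--     """
--     if not bars:
--         return []
--
--     # Group bars by type (bottom, top, side)
--     by_type: dict[str, list[dict]] = {}
--     for bar in bars:
--         bar_type = bar.get("barType", "bottom")
--         if bar_type not in by_type:
--             by_type[bar_type] = []
--         by_type[bar_type].append(bar)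
--
--     # Keep first and last of each type
--     corner_bars = []
--     for bar_type, type_bars in by_type.items():
--         if len(type_bars) >= 2:
--             corner_bars.extend([type_bars[0], type_bars[-1]])
--         else:
--             corner_bars.extend(type_bars)
--
--     return corner_bars
-- ===== SOURCE B (Python) =====
-- def _extract_corner_bars(bars: list[dict]) -> list[dict]:
--     """Recursive partition: peel off the first bar's type, emit its corners, recurse on the rest."""
--     if not bars:
--         return []
--     t = bars[0].get("barType", "bottom")
--     same = [b for b in bars if b.get("barType", "bottom") == t]
--     rest = [b for b in bars if b.get("barType", "bottom") != t]
--     head = same if len(same) < 2 else [same[0], same[-1]]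
--     return head + _extract_corner_bars(rest)
-- ===== Notes on version B (the rewrite author's own statement) =====
-- stated objective: alternative
-- what changed: A builds a dict of full per-type group lists in one pass and then slices first/last from each group; B uses no dict at all: it recursively partitions the list on the first bar's type, emits that type's first/last (or the single bar) immediately, and recurses on the remaining bars, so types are processed in first-appearance order by construction.
import Mathlib
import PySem

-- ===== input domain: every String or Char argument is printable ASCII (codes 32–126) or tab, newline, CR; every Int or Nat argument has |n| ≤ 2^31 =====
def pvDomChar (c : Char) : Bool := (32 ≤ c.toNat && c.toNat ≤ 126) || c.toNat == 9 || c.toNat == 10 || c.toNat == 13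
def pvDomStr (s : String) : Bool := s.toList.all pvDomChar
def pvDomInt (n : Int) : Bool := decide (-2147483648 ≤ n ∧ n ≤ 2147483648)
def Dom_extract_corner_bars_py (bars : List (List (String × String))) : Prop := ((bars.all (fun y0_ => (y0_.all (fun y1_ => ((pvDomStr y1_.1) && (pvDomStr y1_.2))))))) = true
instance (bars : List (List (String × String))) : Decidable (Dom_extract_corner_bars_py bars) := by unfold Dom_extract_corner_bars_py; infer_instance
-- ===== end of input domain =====

-- B replaces A's dict-of-group-lists by a recursive partition: peel off the first bar's type,
-- emit its first/last immediately, recurse on the remaining bars — no dict, no grouping phase.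


-- shared input accessor: the Python expression bar.get("barType", "bottom") (both A and B use it verbatim)
def pvBarTy (bar : List (String × String)) : String :=
  (PySem.Dict.mk bar).getD "barType" "bottom"

-- ===== PORT A =====
def extract_corner_bars_py (bars : List (List (String × String))) : List (List (String × String)) :=
  if bars = [] then []
  else
    -- by_type: group bars by type
    let byType : PySem.Dict String (List (List (String × String))) :=
      bars.foldl (fun d bar =>
        (if d.contains (pvBarTy bar) then d else d.insert (pvBarTy bar) []).modify
          (pvBarTy bar) [] (fun g => g ++ [bar])) PySem.Dict.empty
    -- keep first and last of each type
    byType.items.foldl (fun acc p =>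
      if 2 ≤ PySem.List.len p.2 then
        acc ++ [PySem.List.pyGetD p.2 0 [], PySem.List.pyGetD p.2 (-1) []]
      else acc ++ p.2) []

-- ===== PORT B =====
-- recursion on bars: split off all bars sharing the head's type ('same'), recurse on 'rest'
def extract_corner_bars_py_alt : List (List (String × String)) → List (List (String × String))
  | [] => []
  | b :: bs =>
    (if PySem.List.len ((b :: bs).filter (fun x => pvBarTy x == pvBarTy b)) < 2
     then (b :: bs).filter (fun x => pvBarTy x == pvBarTy b)
     else [PySem.List.pyGetD ((b :: bs).filter (fun x => pvBarTy x == pvBarTy b)) 0 [],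
           PySem.List.pyGetD ((b :: bs).filter (fun x => pvBarTy x == pvBarTy b)) (-1) []])
      ++ extract_corner_bars_py_alt ((b :: bs).filter (fun x => !(pvBarTy x == pvBarTy b)))
termination_by l => l.length
decreasing_by
  simp only [List.filter_cons, beq_self_eq_true, Bool.not_true, List.length_cons]
  exact Nat.lt_succ_of_le (List.length_filter_le _ _)

-- ===== PRECONDITION & SPEC =====
def Spec_extract_corner_bars_py (bars : List (List (String × String))) (out : List (List (String × String))) : Prop := out = extract_corner_bars_py_alt bars
instance (bars : List (List (String × String))) (out : List (List (String × String))) : Decidable (Spec_extract_corner_bars_py bars out) := by unfold Spec_extract_corner_bars_py; infer_instance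

-- ===== CLAIM =====
def Claim_equal_extract_corner_bars_py : Prop := ∀ (bars : List (List (String × String))), Dom_extract_corner_bars_py bars → Spec_extract_corner_bars_py bars (extract_corner_bars_py bars)

-- ===== LEMMAS AND PROOFS =====

-- the common value: first/last (or the whole group when it has < 2 bars) of type t within bars
def pvSeg (bars : List (List (String × String))) (t : String) : List (List (String × String)) :=
  let g := bars.filter (fun x => pvBarTy x == t)
  if 2 ≤ PySem.List.len g then [PySem.List.pyGetD g 0 [], PySem.List.pyGetD g (-1) []] else g

-- appending a Set's worth of elements already in the accumulator changes nothing
lemma foldl_add_filter {α : Type} [DecidableEq α] (x : α) :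
    ∀ (l : List α) (s : List α), x ∈ s →
    (l.filter (fun y => !(y == x))).foldl PySem.Set.add s = l.foldl PySem.Set.add s := by
  intro l
  induction l with
  | nil => intro s _; rfl
  | cons y ys ih =>
    intro s hx
    by_cases h : y = x
    · subst h
      have : PySem.Set.add s y = s := by simp [PySem.Set.add, PySem.Set.contains, hx]
      simp [ih s hx, this]
    · have hb : (y == x) = false := by simp [h]
      have hx' : x ∈ PySem.Set.add s y := by
        simp [PySem.Set.add]; split <;> simp [hx]
      simp [hb, ih _ hx']

-- folding Set.add from x :: s over elements ≠ x keeps x in front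
lemma foldl_add_cons {α : Type} [DecidableEq α] (x : α) :
    ∀ (l : List α) (s : List α), (∀ y ∈ l, y ≠ x) →
    l.foldl PySem.Set.add (x :: s) = x :: l.foldl PySem.Set.add s := by
  intro l
  induction l with
  | nil => intro s _; rfl
  | cons y ys ih =>
    intro s hne
    have hyx : y ≠ x := hne y (by simp)
    have : PySem.Set.add (x :: s) y = x :: PySem.Set.add s y := by
      simp [PySem.Set.add, PySem.Set.contains, hyx]
      split <;> simp
    rw [List.foldl_cons, this, List.foldl_cons, ih _ (fun z hz => hne z (by simp [hz]))]

-- ordered dedup of x :: l = x followed by the dedup of l purged of x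
lemma dedup_cons_filter {α : Type} [DecidableEq α] (x : α) (l : List α) :
    PySem.List.dedup (x :: l) = x :: PySem.List.dedup (l.filter (fun y => !(y == x))) := by
  have h1 : PySem.List.dedup (x :: l) = l.foldl PySem.Set.add [x] := by
    simp [PySem.List.dedup_eq_ofList, PySem.Set.ofList_eq_foldl, PySem.Set.add,
      PySem.Set.contains]
  rw [h1, ← foldl_add_filter x l [x] (by simp),
    foldl_add_cons x _ [] (by intro y hy; have := List.of_mem_filter hy; simpa using this)]
  simp [PySem.List.dedup_eq_ofList, PySem.Set.ofList_eq_foldl]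

-- filtering for type t' inside the t-free rest is filtering bars for t' (t' ≠ t)
lemma filter_rest {t t' : String} (hne : t' ≠ t) (bars : List (List (String × String))) :
    (bars.filter (fun x => !(pvBarTy x == t))).filter (fun x => pvBarTy x == t')
      = bars.filter (fun x => pvBarTy x == t') := by
  rw [List.filter_filter]
  refine List.filter_congr ?_
  intro x _
  by_cases h : pvBarTy x = t'
  · simp [h, hne]
  · simp [h]

lemma flatMap_congr_mem {α β : Type} (l : List α) (f g : α → List β)
    (h : ∀ x ∈ l, f x = g x) : l.flatMap f = l.flatMap g := by
  induction l with
  | nil => rfl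
  | cons y ys ih => simp [List.flatMap_cons, h y (by simp), ih (fun z hz => h z (by simp [hz]))]

-- B computes the concatenation of pvSeg over the types in first-appearance order
lemma altSpec : ∀ (bars : List (List (String × String))),
    extract_corner_bars_py_alt bars
      = (PySem.List.dedup (bars.map pvBarTy)).flatMap (pvSeg bars) := by
  intro bars
  induction hn : bars.length using Nat.strong_induction_on generalizing bars with
  | _ n ih =>
    cases bars with
    | nil => simp [extract_corner_bars_py_alt, PySem.List.dedup]
    | cons b bs =>
      subst hn
      have hrest : ((b :: bs).filter (fun x => !(pvBarTy x == pvBarTy b))).length < (b :: bs).length := by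
        simp only [List.filter_cons, beq_self_eq_true, Bool.not_true, List.length_cons]
        exact Nat.lt_succ_of_le (List.length_filter_le _ _)
      have hIH := ih _ hrest ((b :: bs).filter (fun x => !(pvBarTy x == pvBarTy b))) rfl
      rw [extract_corner_bars_py_alt, hIH]
      have hmapfilter : ((b :: bs).filter (fun x => !(pvBarTy x == pvBarTy b))).map pvBarTy
          = ((b :: bs).map pvBarTy).filter (fun y => !(y == pvBarTy b)) := by
        rw [List.filter_map]; rfl
      have hded : PySem.List.dedup ((b :: bs).map pvBarTy)
          = pvBarTy b :: PySem.List.dedup (((b :: bs).map pvBarTy).filter (fun y => !(y == pvBarTy b))) := by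
        have : (b :: bs).map pvBarTy = pvBarTy b :: bs.map pvBarTy := rfl
        rw [this, dedup_cons_filter]
        congr 2
        simp
      rw [hmapfilter, hded, List.flatMap_cons]
      congr 1
      · -- head segment: B's branch vs pvSeg
        unfold pvSeg
        by_cases h2 : 2 ≤ PySem.List.len ((b :: bs).filter (fun x => pvBarTy x == pvBarTy b))
        · rw [if_pos h2, if_neg (by omega)]
        · rw [if_neg h2, if_pos (by omega)]
      · -- tail: pvSeg over rest equals pvSeg over bars for each remaining type
        refine flatMap_congr_mem _ _ _ ?_
        intro t' ht'
        have ht'mem : t' ∈ ((b :: bs).map pvBarTy).filter (fun y => !(y == pvBarTy b)) :=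
          (PySem.List.mem_dedup _ _).mp ht'
        have hne : t' ≠ pvBarTy b := by
          have := List.of_mem_filter ht'mem; simpa using this
        unfold pvSeg
        rw [filter_rest hne]

-- A's "if absent insert empty list, then append" step is one modify with default []
lemma stepA_eq (d : PySem.Dict String (List (List (String × String)))) (t : String)
    (b : List (String × String)) :
    (if d.contains t then d else d.insert t []).modify t [] (fun g => g ++ [b])
      = d.modify t [] (fun g => g ++ [b]) := by
  by_cases h : d.contains t = true
  · simp [h]
  · have h' : d.contains t = false := by simpa using h
    simp [h', PySem.Dict.modify, PySem.Dict.getD_insert_self, PySem.Dict.insert_insert_self,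
      PySem.Dict.getD_of_not_contains _ _ h']

-- A's grouping dict holds, at each key, exactly the bars of that type
lemma foldA_getD (bars : List (List (String × String))) (c : String) :
    (bars.foldl (fun d bar => d.modify (pvBarTy bar) [] (fun g => g ++ [bar]))
        PySem.Dict.empty).getD c []
      = bars.filter (fun b => pvBarTy b == c) := by
  have h := PySem.Dict.getD_foldl_modify_append (bars.map (fun b => (pvBarTy b, b)))
    (PySem.Dict.empty) c
  rw [List.foldl_map] at h
  simpa [List.filter_map, Function.comp_def, PySem.Dict.getD_empty] using h

-- ===== VERDICT =====
theorem extract_corner_bars_py_spec : Claim_equal_extract_corner_bars_py := by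
  unfold Claim_equal_extract_corner_bars_py
  intro bars _
  unfold Spec_extract_corner_bars_py extract_corner_bars_py
  rw [altSpec]
  by_cases hb : bars = []
  · subst hb; simp [PySem.List.dedup]
  · simp only [hb, if_false]
    have hstep : (fun (d : PySem.Dict String (List (List (String × String)))) bar =>
        (if d.contains (pvBarTy bar) then d else d.insert (pvBarTy bar) []).modify
          (pvBarTy bar) [] (fun g => g ++ [bar]))
        = (fun d bar => d.modify (pvBarTy bar) [] (fun g => g ++ [bar])) :=
      funext fun d => funext fun bar => stepA_eq d (pvBarTy bar) bar
    rw [hstep]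
    set dA := bars.foldl (fun d bar => d.modify (pvBarTy bar) [] (fun g => g ++ [bar]))
      PySem.Dict.empty with hdA
    have hndA : dA.keys.Nodup := by
      rw [hdA]
      exact PySem.Dict.nodup_keys_foldl_modify_key bars pvBarTy [] _ _ (by simp [PySem.Dict.keys_empty])
    have hKA : dA.keys = PySem.List.dedup (bars.map pvBarTy) := by
      rw [hdA, PySem.Dict.keys_foldl_modify_key bars pvBarTy [] (fun _ bar => fun g => g ++ [bar]) _]
      simp [PySem.Dict.keys_empty, PySem.List.dedup_eq_ofList]
      rfl
    rw [PySem.Dict.items_eq_map_keys dA hndA []]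
    have hbody : (fun (acc : List (List (String × String))) (p : String × List (List (String × String))) =>
        if 2 ≤ PySem.List.len p.2 then
          acc ++ [PySem.List.pyGetD p.2 0 [], PySem.List.pyGetD p.2 (-1) []]
        else acc ++ p.2)
        = (fun acc p => acc ++ (if 2 ≤ PySem.List.len p.2 then
            [PySem.List.pyGetD p.2 0 [], PySem.List.pyGetD p.2 (-1) []] else p.2)) := by
      funext acc p; split <;> rfl
    rw [hbody, List.foldl_map, PySem.List.foldl_append_eq_flatMap, List.nil_append, hKA]
    refine flatMap_congr_mem _ _ _ ?_
    intro t _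
    have := foldA_getD bars t
    rw [← hdA] at this
    unfold pvSeg
    rw [this]
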